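-- pv_equiv track=rewrite | github.com/mattrmd/joplen_mlsp2024 | ml_utils/src/ml_utils/utils.py | comb_iterator
-- ===== SOURCE A (Python) =====
-- from collections import Counter, defaultdict
-- from itertools import combinations
-- from typing import (
--     Dict,
--     Generator,
--     Iterable,
--     List,
--     Set,
--     Tuple,
--     Union,
-- )
--
-- def comb_iterator(sets: list[Set]) -> Generator[Set, None, None]:
--     """Generates every partition of an n-dimensional venn diagram.
--     This is necessary because some datasets overlap, and we need
--     to find all of the ways that each dataset overlaps so that
--     we can make sure that we have no data leakage when performing
--     training and testing.
--
--     Args: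
--         sets (list[Set]): A list of sets, where each set is one\
--         component (circle) of the n-dimensional venn-diagram
--
--     Yields:
--         Generator[Set,None,None]: A set that holds the elements
--         from one partition of the n-dimensional venn diagram
--     """
--
--     # Iterate over all possible combinations of the sets
--     for i in range(1, len(sets) + 1):
--         for comb in combinations(sets, i):
--             # Find all sets that are not part of this combination
--             comb_comp = list(
--                 (
--                     Counter(map(frozenset, sets)) - Counter(map(frozenset, comb))
--                 ).elements()
--             )
--
--             # set.union doesn't accept an empty list
--             if len(comb_comp) > 0:
--                 union = set.union(*map(set, comb_comp))
--             else:
--                 union = set()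
--
--             yield set.intersection(*map(set, comb)) - union
-- ===== SOURCE B (Python) =====
-- from itertools import combinations
--
--
-- def comb_iterator(sets):
--     """Same partitions as A, but via per-element membership signatures:
--     each element is tagged once with the tuple of set indices containing it,
--     elements are grouped by signature, and each combination just looks up
--     its group -- no per-combination Counter/union/intersection work."""
--     sets = list(sets)
--     n = len(sets)
--     sig = {}
--     for i, s in enumerate(sets):
--         for x in s:
--             sig[x] = sig.get(x, ()) + (i,)
--     groups = {}
--     for x, key in sig.items():
--         groups.setdefault(key, []).append(x)
--     for r in range(1, n + 1):
--         for idxs in combinations(range(n), r):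
--             yield set(groups.get(idxs, ()))
-- ===== Notes on version B (the rewrite author's own statement) =====
-- stated objective: faster
-- what changed: Instead of rebuilding a Counter multiset difference, a union of the complement sets and an intersection for every one of the 2^n combinations, B tags each element once with the tuple of indices of the sets containing it, groups elements by that signature, and each combination merely looks up its group.
import Mathlib
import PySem

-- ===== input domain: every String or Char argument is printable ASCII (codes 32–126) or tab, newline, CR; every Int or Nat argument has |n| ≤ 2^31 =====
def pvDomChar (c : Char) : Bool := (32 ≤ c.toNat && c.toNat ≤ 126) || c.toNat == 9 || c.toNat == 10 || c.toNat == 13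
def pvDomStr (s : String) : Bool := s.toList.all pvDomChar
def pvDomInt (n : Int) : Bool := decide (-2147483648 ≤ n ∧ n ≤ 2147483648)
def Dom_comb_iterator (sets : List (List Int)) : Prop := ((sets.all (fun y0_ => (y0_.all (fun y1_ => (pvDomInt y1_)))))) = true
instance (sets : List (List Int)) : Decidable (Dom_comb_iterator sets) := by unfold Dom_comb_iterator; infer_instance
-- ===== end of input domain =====

-- B replaces A's per-combination Counter/union/intersection work by one pass that groups the
-- elements by their membership signature; each combination then just looks up its group (faster).

-- ===== PORT A =====
-- list((Counter(map(frozenset, sets)) - Counter(map(frozenset, comb))).elements()), ported with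
-- frozenset as PySem.Set.ofList. The Counter is keyed by those canonical lists under list
-- equality, while Python compares frozensets as sets: for inner lists that are permutations of
-- one another the key multisets differ, but only MEMBERSHIP of the union of the remaining
-- multiset is consumed below, and that union has exactly the same members either way (it is the
-- union of the sets at the unchosen indices — proved in pv_mem_unionA), so the yielded cell is
-- Python-exact on every input.
def pvElementsSub (xs ys : List (List Int)) : List (List Int) :=
  ((PySem.Dict.counter xs).items).flatMap
    (fun p => List.replicate (p.2 - (PySem.Dict.counter ys).getD p.1 0).toNat p.1)

-- one yielded partition: set.intersection(*map(set, comb)) - union(comb_comp)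
def pvCellA (sets comb : List (List Int)) : List Int :=
  let comb_comp := pvElementsSub (sets.map PySem.Set.ofList) (comb.map PySem.Set.ofList)
  let union : List Int :=
    match comb_comp with
    | [] => []
    | c :: rest => rest.foldl (fun u s => PySem.Set.union u (PySem.Set.ofList s)) (PySem.Set.ofList c)
  match comb with
  | [] => []   -- unreachable: every combination yielded has length ≥ 1
  | c :: rest =>
      PySem.Set.diff (rest.foldl (fun a s => PySem.Set.inter a (PySem.Set.ofList s)) (PySem.Set.ofList c)) union

def comb_iterator (sets : List (List Int)) : List (List Int) :=
  (PySem.List.pyRange 1 (PySem.List.len sets + 1) 1).foldl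
    (fun acc i => acc ++ (PySem.List.combinations sets i.toNat).map (fun comb => pvCellA sets comb)) []

-- ===== PORT B =====
-- 'for x in s' iterates a Python set: ported as a fold over PySem.Set.ofList s (each yielded
-- value is a set, so the result cannot depend on that iteration order).
def comb_iterator_alt (sets : List (List Int)) : List (List Int) :=
  let n := PySem.List.len sets
  let sig : PySem.Dict Int (List Int) :=
    (PySem.List.enumerate sets 0).foldl
      (fun d p => (PySem.Set.ofList p.2).foldl (fun d x => d.insert x (d.getD x [] ++ [p.1])) d)
      PySem.Dict.empty
  let groups : PySem.Dict (List Int) (List Int) :=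
    sig.items.foldl (fun g q => g.modify q.2 [] (fun l => l ++ [q.1])) PySem.Dict.empty
  (PySem.List.pyRange 1 (n + 1) 1).foldl
    (fun acc r => acc ++ (PySem.List.combinations (PySem.List.pyRange 0 n 1) r.toNat).map
        (fun idxs => PySem.Set.ofList (groups.getD idxs []))) []

-- ===== PRECONDITION & SPEC =====
def Spec_comb_iterator (sets : List (List Int)) (out : List (List Int)) : Prop := out = comb_iterator_alt sets
instance (sets : List (List Int)) (out : List (List Int)) : Decidable (Spec_comb_iterator sets out) := by unfold Spec_comb_iterator; infer_instance

-- ===== CLAIM (what is proved, stated in full; the proofs are below) =====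
def Claim_equal_comb_iterator : Prop := ∀ (sets : List (List Int)), Dom_comb_iterator sets → Spec_comb_iterator sets (comb_iterator sets)

-- ===== LEMMAS AND PROOFS =====

-- proof-side descriptions of what the two programs compute
def pvGetter (sets : List (List Int)) (j : Int) : List Int := PySem.List.pyGetD sets j []

def pvSigOf (sets : List (List Int)) (x : Int) : List Int :=
  (PySem.List.pyRange 0 (PySem.List.len sets) 1).filter (fun j => decide (x ∈ pvGetter sets j))

def pvSig (sets : List (List Int)) : PySem.Dict Int (List Int) :=
  (PySem.List.enumerate sets 0).foldl
      (fun d p => (PySem.Set.ofList p.2).foldl (fun d x => d.insert x (d.getD x [] ++ [p.1])) d)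
      PySem.Dict.empty

def pvGroups (sets : List (List Int)) : PySem.Dict (List Int) (List Int) :=
  (pvSig sets).items.foldl (fun g q => g.modify q.2 [] (fun l => l ++ [q.1])) PySem.Dict.empty

-- union fold membership
theorem pv_mem_foldl_union (l : List (List Int)) (a : List Int) (x : Int) :
    (x ∈ l.foldl (fun u s => PySem.Set.union u (PySem.Set.ofList s)) a) ↔ x ∈ a ∨ ∃ s ∈ l, x ∈ s := by
  induction l generalizing a with
  | nil => simp
  | cons c rest ih =>
      simp [ih, PySem.Set.mem_union, PySem.Set.mem_ofList, or_assoc]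

-- intersection fold is a filter
theorem pv_foldl_inter (l : List (List Int)) (a : List Int) :
    l.foldl (fun u s => PySem.Set.inter u (PySem.Set.ofList s)) a
      = a.filter (fun x => decide (∀ s ∈ l, x ∈ s)) := by
  induction l generalizing a with
  | nil => simp
  | cons c rest ih =>
      rw [List.foldl_cons, ih]
      simp only [PySem.Set.inter, List.filter_filter]
      apply List.filter_congr
      intro x _
      rw [Bool.eq_iff_iff]
      simp [PySem.Set.mem_ofList, and_comm]

theorem pv_mem_elementsSub (xs ys : List (List Int)) (v : List Int) :
    v ∈ pvElementsSub xs ys ↔ v ∈ xs ∧ ys.count v < xs.count v := by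
  unfold pvElementsSub
  simp only [PySem.Dict.items_counter, PySem.Dict.getD_counter, List.mem_flatMap, List.mem_map,
    List.mem_replicate, PySem.Set.mem_ofList]
  constructor
  · rintro ⟨p, ⟨k, hk, rfl⟩, hne, rfl⟩
    refine ⟨hk, ?_⟩
    simp at hne
    omega
  · rintro ⟨hv, hlt⟩
    exact ⟨(v, (xs.count v : Int)), ⟨v, hv, rfl⟩, by simp; omega, rfl⟩

-- strict count inequality over a sublist of the index range = a witness outside the sublist
theorem pv_count_lt_iff (sets : List (List Int)) (idxs : List Int) (v : List Int)
    (hsub : idxs.Sublist (PySem.List.pyRange 0 (sets.length : Int) 1)) :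
    ((idxs.map (pvGetter sets)).map PySem.Set.ofList).count v
        < (sets.map PySem.Set.ofList).count v
      ↔ ∃ j, (j ∈ PySem.List.pyRange 0 (sets.length : Int) 1) ∧ j ∉ idxs
              ∧ PySem.Set.ofList (pvGetter sets j) = v := by
  have hsets : sets = (PySem.List.pyRange 0 (sets.length : Int) 1).map (pvGetter sets) := by
    exact (PySem.List.map_pyGetD_pyRange_zero' sets []).symm
  set R := PySem.List.pyRange 0 (sets.length : Int) 1 with hR
  have hperm : R.Perm (idxs ++ R.filter (fun j => decide (j ∉ idxs))) := by
    rw [List.perm_ext_iff_of_nodup (PySem.List.nodup_pyRange_one 0 _) ?_]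
    · intro a
      simp only [List.mem_append, List.mem_filter, decide_eq_true_iff]
      constructor
      · intro ha
        by_cases h : a ∈ idxs
        · exact Or.inl h
        · exact Or.inr ⟨ha, h⟩
      · rintro (h | ⟨h, _⟩)
        · exact hsub.subset h
        · exact h
    · refine List.Nodup.append (hsub.nodup (PySem.List.nodup_pyRange_one 0 _))
        ((PySem.List.nodup_pyRange_one 0 _).filter _) ?_
      intro a ha hb
      simp only [List.mem_filter, decide_eq_true_iff] at hb
      exact hb.2 ha
  have hcnt : ∀ (l : List Int), ((l.map (pvGetter sets)).map PySem.Set.ofList).count v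
      = l.countP (fun j => PySem.Set.ofList (pvGetter sets j) == v) := by
    intro l
    simp [List.count, List.countP_map, Function.comp_def]
  have hcS : ((sets.map PySem.Set.ofList).count v)
      = R.countP (fun j => PySem.Set.ofList (pvGetter sets j) == v) := by
    conv_lhs => rw [hsets]
    exact hcnt R
  rw [hcnt idxs, hcS, hperm.countP_eq, List.countP_append]
  constructor
  · intro h
    have : 0 < (R.filter (fun j => decide (j ∉ idxs))).countP
        (fun j => PySem.Set.ofList (pvGetter sets j) == v) := by omega
    rw [List.countP_pos_iff] at this
    obtain ⟨j, hj, hjv⟩ := this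
    simp only [List.mem_filter, decide_eq_true_iff] at hj
    exact ⟨j, hj.1, hj.2, by simpa using hjv⟩
  · rintro ⟨j, hjR, hjn, hjv⟩
    have : 0 < (R.filter (fun j => decide (j ∉ idxs))).countP
        (fun j => PySem.Set.ofList (pvGetter sets j) == v) := by
      rw [List.countP_pos_iff]
      exact ⟨j, by simp [hjR, hjn], by simpa using hjv⟩
    omega

theorem pv_mem_unionMatch (cc : List (List Int)) (x : Int) :
    (x ∈ (match cc with
          | [] => ([] : List Int)
          | c :: rest => rest.foldl (fun u s => PySem.Set.union u (PySem.Set.ofList s)) (PySem.Set.ofList c)))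
      ↔ ∃ s ∈ cc, x ∈ s := by
  cases cc with
  | nil => simp
  | cons c rest => simp [pv_mem_foldl_union, PySem.Set.mem_ofList]

-- membership in A's per-combination union = membership in some unchosen set
theorem pv_mem_unionA (sets : List (List Int)) (idxs : List Int)
    (hsub : idxs.Sublist (PySem.List.pyRange 0 (sets.length : Int) 1)) (x : Int) :
    (x ∈ (match pvElementsSub (sets.map PySem.Set.ofList) ((idxs.map (pvGetter sets)).map PySem.Set.ofList) with
          | [] => ([] : List Int)
          | c :: rest => rest.foldl (fun u s => PySem.Set.union u (PySem.Set.ofList s)) (PySem.Set.ofList c)))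
      ↔ ∃ j, (j ∈ PySem.List.pyRange 0 (sets.length : Int) 1) ∧ j ∉ idxs ∧ x ∈ pvGetter sets j := by
  rw [pv_mem_unionMatch]
  constructor
  · rintro ⟨v, hv, hxv⟩
    rw [pv_mem_elementsSub] at hv
    obtain ⟨j, hjR, hjn, hjv⟩ := (pv_count_lt_iff sets idxs v hsub).1 hv.2
    refine ⟨j, hjR, hjn, ?_⟩
    rw [← hjv] at hxv
    rwa [PySem.Set.mem_ofList] at hxv
  · rintro ⟨j, hjR, hjn, hjx⟩
    refine ⟨PySem.Set.ofList (pvGetter sets j), ?_, (PySem.Set.mem_ofList _ _).2 hjx⟩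
    rw [pv_mem_elementsSub]
    constructor
    · rw [PySem.List.mem_pyRange_one] at hjR
      refine List.mem_map_of_mem (PySem.List.pyGetD_mem sets [] ?_)
      unfold PySem.Raise.InRange
      omega
    · exact (pv_count_lt_iff sets idxs _ hsub).2 ⟨j, hjR, hjn, rfl⟩

-- filtering a nodup list by membership in one of its sublists gives back the sublist
theorem pv_filter_mem_sublist {l₂ l₁ : List Int} (h : l₂.Sublist l₁) (hn : l₁.Nodup) :
    l₁.filter (fun j => decide (j ∈ l₂)) = l₂ := by
  induction h with
  | slnil => simp
  | @cons l₂' l₁' a h ih =>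
      rw [List.nodup_cons] at hn
      have ha : a ∉ l₂' := fun hm => hn.1 (h.subset hm)
      simp only [List.filter_cons, ha, decide_false]
      exact ih hn.2
  | @cons₂ l₂' l₁' a h ih =>
      rw [List.nodup_cons] at hn
      simp only [List.filter_cons, List.mem_cons, true_or, decide_true, if_true]
      congr 1
      rw [List.filter_congr (q := fun j => decide (j ∈ l₂')) ?_]
      · exact ih hn.2
      · intro x hx
        have : x ≠ a := fun he => hn.1 (he ▸ hx)
        simp [this]

-- A's yielded cell for the combination with (strictly increasing) index list i1 :: t
theorem pv_cellA_eq (sets : List (List Int)) (i1 : Int) (t : List Int)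
    (hsub : (i1 :: t).Sublist (PySem.List.pyRange 0 (sets.length : Int) 1)) :
    pvCellA sets ((i1 :: t).map (pvGetter sets))
      = (PySem.Set.ofList (pvGetter sets i1)).filter
          (fun x => decide (pvSigOf sets x = i1 :: t)) := by
  unfold pvCellA
  simp only [List.map_cons]
  rw [pv_foldl_inter]
  unfold PySem.Set.diff
  rw [List.filter_filter]
  apply List.filter_congr
  intro x hx
  rw [Bool.eq_iff_iff]
  have hx' : x ∈ pvGetter sets i1 := (PySem.Set.mem_ofList _ _).1 hx
  have hU := pv_mem_unionA sets (i1 :: t) hsub x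
  simp only [List.map_cons] at hU
  simp only [Bool.and_eq_true, decide_eq_true_iff, Bool.not_eq_true',
    ← Bool.not_eq_true, PySem.Set.contains_iff, hU]
  constructor
  · rintro ⟨hnone, hall⟩
    have hmem : ∀ j ∈ PySem.List.pyRange 0 (sets.length : Int) 1,
        (x ∈ pvGetter sets j ↔ j ∈ i1 :: t) := by
      intro j hjR
      constructor
      · intro hxj
        by_contra hjn
        exact hnone ⟨j, hjR, hjn, hxj⟩
      · intro hj
        rcases List.mem_cons.1 hj with rfl | hj
        · exact hx'
        · exact hall _ (List.mem_map_of_mem hj)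
    unfold pvSigOf
    rw [List.filter_congr (q := fun j => decide (j ∈ i1 :: t)) ?_]
    · rw [PySem.List.len_eq]
      exact pv_filter_mem_sublist hsub (PySem.List.nodup_pyRange_one 0 _)
    · intro j hj
      rw [PySem.List.len_eq] at hj
      simp only [decide_eq_decide]
      exact hmem j hj
  · intro hsig
    have hmem : ∀ j, j ∈ (i1 :: t) ↔ (j ∈ PySem.List.pyRange 0 (sets.length : Int) 1 ∧ x ∈ pvGetter sets j) := by
      intro j
      rw [← hsig]
      unfold pvSigOf
      rw [PySem.List.len_eq]
      simp [List.mem_filter]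
    constructor
    · rintro ⟨j, hjR, hjn, hxj⟩
      exact hjn ((hmem j).2 ⟨hjR, hxj⟩)
    · rintro s hs
      rw [List.mem_map] at hs
      obtain ⟨j, hj, rfl⟩ := hs
      exact ((hmem j).1 (List.mem_cons_of_mem _ hj)).2

-- one scanned set: effect of the inner insert loop on the dict's items
theorem pv_sig_inner (m : Int) (l : List Int) (d : PySem.Dict Int (List Int))
    (hl : l.Nodup) (hd : d.keys.Nodup) :
    (l.foldl (fun d x => d.insert x (d.getD x [] ++ [m])) d).items
      = d.items.map (fun p => if p.1 ∈ l then (p.1, p.2 ++ [m]) else p)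
        ++ (l.filter (fun x => !(d.contains x))).map (fun x => (x, [m])) := by
  induction l generalizing d with
  | nil => simp
  | cons a rest ih =>
    rw [List.nodup_cons] at hl
    rw [List.foldl_cons, ih _ hl.2 (PySem.Dict.nodup_keys_insert d a _ hd)]
    by_cases hc : d.contains a = true
    · rw [PySem.Dict.items_insert_of_contains d _ hc, List.filter_cons_of_neg (by simp [hc])]
      congr 1
      · rw [List.map_map]
        apply List.map_congr_left
        intro p hp
        obtain ⟨pk, pv⟩ := p
        by_cases hpa : pk = a
        · subst hpa
          have hval : d.getD pk [] = pv := PySem.Dict.getD_of_mem_items d hp hd []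
          simp [hl.1, hval]
        · have hne : ((pk, pv).1 == a) = false := by simp [hpa]
          simp only [Function.comp_apply, hne, Bool.false_eq_true, if_false]
          by_cases hr : pk ∈ rest <;> simp [List.mem_cons, hpa, hr]
      · refine congrArg _ (List.filter_congr ?_)
        intro y hy
        have hya : y ≠ a := fun he => hl.1 (he ▸ hy)
        simp [PySem.Dict.contains_insert, hya]
    · rw [Bool.not_eq_true] at hc
      rw [PySem.Dict.items_insert_of_not_contains d _ hc,
        PySem.Dict.getD_of_not_contains d [] hc, List.filter_cons_of_pos (by simp [hc])]
      rw [List.map_append]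
      simp only [List.map_cons, List.map_nil, List.nil_append]
      rw [List.append_assoc]
      congr 1
      · apply List.map_congr_left
        intro p hp
        have hpa : p.1 ≠ a := by
          intro he
          have : d.contains p.1 = true := by
            rw [PySem.Dict.contains_iff_mem_keys]
            exact PySem.Dict.mem_keys_of_mem_items d hp
          rw [he] at this
          simp [hc] at this
        simp [List.mem_cons, hpa]
      · rw [if_neg hl.1, List.singleton_append]
        congr 1
        refine congrArg _ (List.filter_congr ?_)
        intro y hy
        have hya : y ≠ a := fun he => hl.1 (he ▸ hy)
        simp [PySem.Dict.contains_insert, hya]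

theorem pv_sigOf_append (pre : List (List Int)) (s : List Int) (x : Int) :
    pvSigOf (pre ++ [s]) x
      = pvSigOf pre x ++ (if x ∈ s then [(pre.length : Int)] else []) := by
  unfold pvSigOf
  simp only [PySem.List.len_eq, List.length_append, List.length_cons, List.length_nil]
  have hlen : ((pre.length + (0 + 1) : Nat) : Int) = (pre.length : Int) + 1 := by push_cast; ring
  rw [hlen, PySem.List.pyRange_one_succ_right (a := 0) (b := (pre.length : Int)) (by omega),
    List.filter_append]
  congr 1
  · apply List.filter_congr
    intro j hj
    rw [PySem.List.mem_pyRange_one] at hj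
    have h1 : pvGetter (pre ++ [s]) j = pvGetter pre j := by
      unfold pvGetter
      rw [PySem.List.pyGetD_eq_getElem _ _ hj.1 (by simp; omega),
        PySem.List.pyGetD_eq_getElem _ _ hj.1 (by simpa using hj.2),
        List.getElem_append_left]
    rw [h1]
  · have h2 : pvGetter (pre ++ [s]) (pre.length : Int) = s := by
      unfold pvGetter
      rw [PySem.List.pyGetD_eq_getElem _ _ (by omega) (by simp)]
      simp
    by_cases hxs : x ∈ s <;> simp [h2, hxs]

theorem pv_sigOf_nil_of_not_mem (pre : List (List Int)) (x : Int) (hx : x ∉ pre.flatten) :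
    pvSigOf pre x = [] := by
  unfold pvSigOf
  rw [List.filter_eq_nil_iff]
  intro j hj
  rw [PySem.List.mem_pyRange_one, PySem.List.len_eq] at hj
  simp only [decide_eq_true_iff]
  intro hxg
  exact hx (List.mem_flatten.2 ⟨pvGetter pre j, PySem.List.pyGetD_mem pre [] (by unfold PySem.Raise.InRange; omega), hxg⟩)

theorem pv_sig_keys (sets : List (List Int))
    (h : (pvSig sets).items = (PySem.Set.ofList sets.flatten).map (fun x => (x, pvSigOf sets x))) :
    (pvSig sets).keys = PySem.Set.ofList sets.flatten := by
  simp only [PySem.Dict.keys, h, List.map_map]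
  simp [Function.comp_def]

theorem pv_sig_items (sets : List (List Int)) :
    (pvSig sets).items = (PySem.Set.ofList sets.flatten).map (fun x => (x, pvSigOf sets x)) := by
  induction sets using List.reverseRecOn with
  | nil => rfl
  | append_singleton pre s ih =>
    unfold pvSig
    rw [PySem.List.enumerate_append, List.foldl_append]
    simp only [PySem.List.enumerate, List.foldl_cons, List.foldl_nil]
    rw [show (List.foldl _ PySem.Dict.empty (PySem.List.enumerate pre 0)) = pvSig pre from rfl]
    simp only [zero_add]
    have hkeys := pv_sig_keys pre ih
    have hknd : (pvSig pre).keys.Nodup := by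
      rw [hkeys]; exact PySem.Set.nodup_ofList _
    rw [pv_sig_inner (pre.length : Int) (PySem.Set.ofList s) (pvSig pre)
      (PySem.Set.nodup_ofList s) hknd, ih]
    simp only [List.flatten_append, List.flatten_cons, List.flatten_nil, List.append_nil]
    rw [PySem.Set.ofList_append, PySem.Set.update_eq_append_filter, List.map_append, List.map_map]
    congr 1
    · apply List.map_congr_left
      intro x hx
      simp only [Function.comp_apply]
      rw [pv_sigOf_append]
      by_cases hxs : x ∈ s
      · rw [if_pos ((PySem.Set.mem_ofList _ _).2 hxs)]
        simp [hxs]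
      · rw [if_neg (fun h => hxs ((PySem.Set.mem_ofList _ _).1 h))]
        simp [hxs]
    · have hfe : (PySem.Set.ofList s).filter (fun x => !(pvSig pre).contains x)
          = (PySem.Set.ofList s).filter (fun y => !(PySem.Set.ofList pre.flatten).contains y) := by
        apply List.filter_congr
        intro x _
        have : (pvSig pre).contains x = (PySem.Set.ofList pre.flatten).contains x := by
          rw [Bool.eq_iff_iff, PySem.Dict.contains_iff_mem_keys, hkeys, PySem.Set.contains_iff]
        rw [this]
      rw [hfe]
      apply List.map_congr_left
      intro x hx
      rw [List.mem_filter] at hx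
      have hxs : x ∈ s := (PySem.Set.mem_ofList _ _).1 hx.1
      have hxf : x ∉ pre.flatten := by
        intro h
        have h2 := hx.2
        simp only [Bool.not_eq_eq_eq_not, Bool.not_true, ← Bool.not_eq_true,
          PySem.Set.contains_iff] at h2
        exact h2 ((PySem.Set.mem_ofList _ _).2 h)
      rw [pv_sigOf_append, pv_sigOf_nil_of_not_mem pre x hxf, if_pos hxs]
      simp

theorem pv_groups_getD (sets : List (List Int)) (idxs : List Int) :
    (pvGroups sets).getD idxs []
      = (PySem.Set.ofList sets.flatten).filter (fun x => decide (pvSigOf sets x = idxs)) := by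
  unfold pvGroups
  rw [← List.foldl_map (f := fun q : Int × List Int => (q.2, q.1))
    (g := fun (g : PySem.Dict (List Int) (List Int)) p => g.modify p.1 [] (fun l => l ++ [p.2]))]
  rw [PySem.Dict.getD_foldl_modify_append, pv_sig_items]
  simp only [PySem.Dict.getD_empty, List.nil_append, List.map_map, List.filter_map,
    Function.comp_def]
  rw [List.map_id']
  apply List.filter_congr
  intro x _
  rw [Bool.eq_iff_iff]
  simp

theorem pv_filter_ofList_append_left (P : Int → Bool) (A B : List Int)
    (h : ∀ x, P x = true → x ∉ A) :
    (PySem.Set.ofList (A ++ B)).filter P = (PySem.Set.ofList B).filter P := by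
  rw [PySem.Set.ofList_append, PySem.Set.update_eq_append_filter, List.filter_append,
    List.filter_filter]
  have h1 : (PySem.Set.ofList A).filter P = [] := by
    rw [List.filter_eq_nil_iff]
    intro x hx hP
    exact h x hP ((PySem.Set.mem_ofList _ _).1 hx)
  rw [h1, List.nil_append]
  apply List.filter_congr
  intro x _
  by_cases hP : P x = true
  · have hxA : x ∉ A := h x hP
    simp [hP, hxA]
  · simp [Bool.eq_false_iff.2 hP]

theorem pv_filter_ofList_append_right (P : Int → Bool) (A B : List Int)
    (h : ∀ x, P x = true → x ∈ A) :
    (PySem.Set.ofList (A ++ B)).filter P = (PySem.Set.ofList A).filter P := by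
  rw [PySem.Set.ofList_append, PySem.Set.update_eq_append_filter, List.filter_append,
    List.filter_filter]
  have h2 : (PySem.Set.ofList B).filter (fun a => P a && !(PySem.Set.ofList A).contains a) = [] := by
    rw [List.filter_eq_nil_iff]
    intro x _ hx
    rw [Bool.and_eq_true, Bool.not_eq_true', ← Bool.not_eq_true, PySem.Set.contains_iff] at hx
    exact hx.2 ((PySem.Set.mem_ofList _ _).2 (h x hx.1))
  rw [h2, List.append_nil]

-- only the first chosen set can contain an element whose signature is exactly i1 :: t
theorem pv_narrow (sets : List (List Int)) (i1 : Int) (t : List Int)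
    (hsub : (i1 :: t).Sublist (PySem.List.pyRange 0 (sets.length : Int) 1)) :
    (PySem.Set.ofList sets.flatten).filter (fun x => decide (pvSigOf sets x = i1 :: t))
      = (PySem.Set.ofList (pvGetter sets i1)).filter (fun x => decide (pvSigOf sets x = i1 :: t)) := by
  have hi1R : i1 ∈ PySem.List.pyRange 0 (sets.length : Int) 1 := hsub.subset (List.mem_cons_self)
  rw [PySem.List.mem_pyRange_one] at hi1R
  have hsorted : (i1 :: t).Pairwise (· < ·) :=
    (PySem.List.pairwise_lt_pyRange_one 0 (sets.length : Int)).sublist hsub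
  -- any element whose signature is i1 :: t lies in set i1 and in no set with smaller index
  have hkey : ∀ x : Int, pvSigOf sets x = i1 :: t →
      x ∈ pvGetter sets i1 ∧ ∀ j : Int, 0 ≤ j → j < i1 → x ∉ pvGetter sets j := by
    intro x hsig
    constructor
    · have : i1 ∈ (PySem.List.pyRange 0 (sets.length : Int) 1).filter
          (fun j => decide (x ∈ pvGetter sets j)) := by
        unfold pvSigOf at hsig
        rw [PySem.List.len_eq] at hsig
        rw [hsig]
        exact List.mem_cons_self
      simpa using (List.mem_filter.1 this).2
    · intro j hj0 hji hxj
      have hjmem : j ∈ (PySem.List.pyRange 0 (sets.length : Int) 1).filter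
          (fun j => decide (x ∈ pvGetter sets j)) := by
        rw [List.mem_filter, PySem.List.mem_pyRange_one]
        exact ⟨⟨hj0, by omega⟩, by simpa using hxj⟩
      unfold pvSigOf at hsig
      rw [PySem.List.len_eq] at hsig
      rw [hsig] at hjmem
      rcases List.mem_cons.1 hjmem with rfl | hjt
      · omega
      · have := (List.pairwise_cons.1 hsorted).1 j hjt
        omega
  have hget : pvGetter sets i1 = sets[i1.toNat]'(by omega) := by
    unfold pvGetter
    exact PySem.List.pyGetD_eq_getElem sets [] (by omega) (by omega)
  have hdec := (List.take_append_drop i1.toNat sets).symm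
  rw [List.drop_eq_getElem_cons (show i1.toNat < sets.length by omega)] at hdec
  have hflat := congrArg List.flatten hdec
  simp only [List.flatten_append, List.flatten_cons] at hflat
  have hL : ∀ x : Int, decide (pvSigOf sets x = i1 :: t) = true
      → x ∉ (sets.take i1.toNat).flatten := by
    intro x hP hxA
    rw [decide_eq_true_iff] at hP
    obtain ⟨l, hl, hxl⟩ := List.mem_flatten.1 hxA
    obtain ⟨j, hj, rfl⟩ := List.mem_iff_getElem.1 hl
    rw [List.getElem_take] at hxl
    have hjlt : j < i1.toNat := by
      have h2 : j < min i1.toNat sets.length := by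
        simpa [List.length_take] using hj
      omega
    have hjget : pvGetter sets (j : Int) = sets[j]'(by omega) := by
      unfold pvGetter
      rw [PySem.List.pyGetD_eq_getElem sets [] (by omega) (by omega)]
      congr 1
    exact (hkey x hP).2 (j : Int) (by omega) (by omega) (by rw [hjget]; exact hxl)
  have hR : ∀ x : Int, decide (pvSigOf sets x = i1 :: t) = true
      → x ∈ sets[i1.toNat]'(by omega) := by
    intro x hP
    rw [decide_eq_true_iff] at hP
    rw [← hget]
    exact (hkey x hP).1
  rw [hflat, pv_filter_ofList_append_left _ _ _ hL, pv_filter_ofList_append_right _ _ _ hR, hget]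

theorem pv_main (sets : List (List Int)) : comb_iterator sets = comb_iterator_alt sets := by
  unfold comb_iterator comb_iterator_alt
  simp only [PySem.List.len_eq]
  apply PySem.List.foldl_congr_mem
  intro acc i hi
  rw [PySem.List.mem_pyRange_one] at hi
  show acc ++ _ = acc ++ (PySem.List.combinations (PySem.List.pyRange 0 (sets.length : Int) 1) i.toNat).map
      (fun idxs => PySem.Set.ofList ((pvGroups sets).getD idxs []))
  congr 1
  have hsets : sets = (PySem.List.pyRange 0 (sets.length : Int) 1).map (pvGetter sets) :=
    (PySem.List.map_pyGetD_pyRange_zero' sets []).symm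
  have hc : PySem.List.combinations sets i.toNat
      = (PySem.List.combinations (PySem.List.pyRange 0 (sets.length : Int) 1) i.toNat).map
          (List.map (pvGetter sets)) := by
    conv_lhs => rw [hsets]
    exact PySem.List.combinations_map _ _ _
  rw [hc, List.map_map]
  apply List.map_congr_left
  intro idxs hmem
  rw [PySem.List.mem_combinations_iff] at hmem
  obtain ⟨hsub, hlen⟩ := hmem
  cases idxs with
  | nil => simp at hlen; omega
  | cons i1 t =>
      simp only [Function.comp_apply]
      have hnd : ((pvGroups sets).getD (i1 :: t) []).Nodup := by
        rw [pv_groups_getD]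
        exact (PySem.Set.nodup_ofList _).filter _
      rw [PySem.Set.ofList_eq_self_of_nodup _ hnd, pv_groups_getD, pv_narrow sets i1 t hsub,
        pv_cellA_eq sets i1 t hsub]

-- ===== VERDICT (by name: the statement is the Claim_ definition above) =====
theorem comb_iterator_spec : Claim_equal_comb_iterator := by
  intro sets _
  show comb_iterator sets = comb_iterator_alt sets
  exact pv_main sets
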